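-- pv_equiv track=rewrite | github.com/FDUDSDE/thesis_202201_master_huangaobin | backend/Sample.py | pair_wise_process
-- ===== SOURCE A (Python) =====
-- import collections
--
-- def pair_wise_process(sampled_communities, sampled_communities_boundaries):
--     count_node_list_dict = collections.defaultdict(list)
--     node_count_dict = collections.defaultdict(int)
--     for community in sampled_communities:
--         for node in community:
--             node_count_dict[node] += 1
--
--     for boundary in sampled_communities_boundaries:
--         for out_node in boundary:
--             node_count_dict[out_node] += 0
--
--     for node in list(node_count_dict):
--         count_node_list_dict[node_count_dict[node]].append(node)
--
--     count_list = list(count_node_list_dict)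
--     #   由高(0)到低(len()-1)
--     sorted_count_list = sorted(count_list, reverse=True)
--
--     out_list = []
--     for sorted_count in sorted_count_list:
--         out_list.append(count_node_list_dict[sorted_count])
--
--     pair_list = []
--     for idx in range(len(out_list) - 1):
--         for node_1 in out_list[idx]:
--             for down_idx in range(1, len(out_list) - idx):
--                 for node_2 in out_list[idx + down_idx]:
--                     pair_list.append([node_1, node_2])
--     #   O(1) > O(2)
--     return pair_list
-- ===== SOURCE B (Python) =====
-- import collections
--
-- def pair_wise_process(sampled_communities, sampled_communities_boundaries):
--     # Count occurrences across communities, then register boundary nodes at count 0.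
--     counts = collections.Counter(node for comm in sampled_communities for node in comm)
--     for boundary in sampled_communities_boundaries:
--         for node in boundary:
--             counts.setdefault(node, 0)
--     groups = {}
--     for node in counts:
--         groups.setdefault(counts[node], []).append(node)
--     # Walk the counts from lowest to highest, keeping `lows` = all nodes of strictly
--     # lower count (highest count first); emit each group's pair block, then stitch
--     # the blocks together back-to-front.
--     rev_blocks = []
--     lows = []
--     for c in sorted(groups):
--         group = groups[c]
--         rev_blocks.append([[n1, n2] for n1 in group for n2 in lows])
--         lows = group + lows
--     pairs = []
--     for block in reversed(rev_blocks):
--         pairs += block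
--     return pairs
-- ===== Notes on version B (the rewrite author's own statement) =====
-- stated objective: alternative
-- what changed: Replaces A's descending sort plus four nested index loops over a list-of-groups with a Counter, an ascending walk over the counts that maintains the strictly-lower-count node suffix and emits each group's pair block, and a final back-to-front stitch of the blocks.
import Mathlib
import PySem

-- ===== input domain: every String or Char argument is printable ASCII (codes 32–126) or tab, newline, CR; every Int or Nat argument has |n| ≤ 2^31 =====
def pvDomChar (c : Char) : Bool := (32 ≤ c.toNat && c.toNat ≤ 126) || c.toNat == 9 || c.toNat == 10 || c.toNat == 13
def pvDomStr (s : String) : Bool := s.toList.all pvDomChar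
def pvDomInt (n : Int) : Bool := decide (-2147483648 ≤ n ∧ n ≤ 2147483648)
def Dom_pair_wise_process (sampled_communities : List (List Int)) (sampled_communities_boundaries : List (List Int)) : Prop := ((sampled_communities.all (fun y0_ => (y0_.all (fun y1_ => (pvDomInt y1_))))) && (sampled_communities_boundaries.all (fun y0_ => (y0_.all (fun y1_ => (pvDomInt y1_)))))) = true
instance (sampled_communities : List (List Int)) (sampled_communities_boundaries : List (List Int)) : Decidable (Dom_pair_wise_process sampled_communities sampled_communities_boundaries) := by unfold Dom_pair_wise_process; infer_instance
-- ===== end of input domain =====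

-- B replaces A's group-dict plus four nested index loops with a Counter, per-count
-- filtering, and a back-to-front fold over ascending counts (objective: alternative).

-- ===== PORT A =====
def pair_wise_process (sampled_communities : List (List Int)) (sampled_communities_boundaries : List (List Int)) : List (List Int) :=
  -- node_count_dict[node] += 1 over communities, then += 0 over boundaries
  let ncd0 : PySem.Dict Int Int :=
    sampled_communities.foldl (fun d community =>
      community.foldl (fun d node => d.modify node 0 (· + 1)) d) PySem.Dict.empty
  let ncd : PySem.Dict Int Int :=
    sampled_communities_boundaries.foldl (fun d boundary =>
      boundary.foldl (fun d out_node => d.modify out_node 0 (· + 0)) d) ncd0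
  -- count_node_list_dict[node_count_dict[node]].append(node) over list(node_count_dict)
  let cnld : PySem.Dict Int (List Int) :=
    ncd.keys.foldl (fun d node => d.modify (ncd.getD node 0) [] (· ++ [node])) PySem.Dict.empty
  let count_list := cnld.keys
  let sorted_count_list := PySem.List.sorted count_list (fun c => c) true
  let out_list := sorted_count_list.foldl (fun acc sorted_count => acc ++ [cnld.getD sorted_count []]) []
  let n : Int := out_list.length
  -- pyGetD: the python indexes out_list[idx] / out_list[idx+down_idx], always in range
  (PySem.List.pyRange 0 (n - 1) 1).foldl (fun pl idx =>
    (PySem.List.pyGetD out_list idx []).foldl (fun pl node_1 =>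
      (PySem.List.pyRange 1 (n - idx) 1).foldl (fun pl down_idx =>
        (PySem.List.pyGetD out_list (idx + down_idx) []).foldl (fun pl node_2 =>
          pl ++ [[node_1, node_2]]) pl) pl) pl) []

-- ===== PORT B =====
def pair_wise_process_alt (sampled_communities : List (List Int)) (sampled_communities_boundaries : List (List Int)) : List (List Int) :=
  let counts : PySem.Dict Int Int :=
    sampled_communities_boundaries.foldl (fun d boundary =>
      boundary.foldl (fun d node => d.setdefault node 0) d)
      (PySem.Dict.counter sampled_communities.flatten)
  let groups : PySem.Dict Int (List Int) :=
    counts.keys.foldl (fun d node => d.modify (counts.getD node 0) [] (· ++ [node])) PySem.Dict.empty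
  let folded := (PySem.List.sorted groups.keys (fun c => c) false).foldl
      (fun (s : List (List (List Int)) × List Int) c =>
        let group := groups.getD c []
        (s.1 ++ [group.flatMap (fun n1 => s.2.map (fun n2 => [n1, n2]))], group ++ s.2))
    ([], [])
  folded.1.reverse.foldl (fun pairs block => pairs ++ block) []

-- ===== PRECONDITION & SPEC =====
def Spec_pair_wise_process (sampled_communities : List (List Int)) (sampled_communities_boundaries : List (List Int)) (out : List (List Int)) : Prop := out = pair_wise_process_alt sampled_communities sampled_communities_boundaries
instance (sampled_communities : List (List Int)) (sampled_communities_boundaries : List (List Int)) (out : List (List Int)) : Decidable (Spec_pair_wise_process sampled_communities sampled_communities_boundaries out) := by unfold Spec_pair_wise_process; infer_instance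

-- ===== CLAIM (what is proved, stated in full; the proofs are below) =====
def Claim_equal_pair_wise_process : Prop := ∀ (sampled_communities : List (List Int)) (sampled_communities_boundaries : List (List Int)), Dom_pair_wise_process sampled_communities sampled_communities_boundaries → Spec_pair_wise_process sampled_communities sampled_communities_boundaries (pair_wise_process sampled_communities sampled_communities_boundaries)

-- ===== LEMMAS AND PROOFS =====

-- pair block of one group against the nodes below it
def pvMk (g lows : List Int) : List (List Int) :=
  g.flatMap (fun n1 => lows.map (fun n2 => [n1, n2]))

-- all pairs from a head group to the flatten of the later groups, recursively
def pvPairsOf : List (List Int) → List (List Int)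
  | [] => []
  | g :: t => pvMk g t.flatten ++ pvPairsOf t

-- B's back-to-front accumulation computes pvPairsOf together with the flatten
def pvBlocks : List (List Int) → List (List (List Int))
  | [] => []
  | g :: t => pvBlocks t ++ [pvMk g t.flatten]

lemma pvBfold (cs : List Int) (groupf : Int → List Int) :
    cs.foldr (fun c (s : List (List (List Int)) × List Int) =>
        (s.1 ++ [(groupf c).flatMap (fun n1 => s.2.map (fun n2 => [n1, n2]))], groupf c ++ s.2))
        ([], [])
      = (pvBlocks (cs.map groupf), (cs.map groupf).flatten) := by
  induction cs with
  | nil => rfl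
  | cons c t ih => simp [pvBlocks, pvMk, ih]

lemma pvBlocksFlatten (gs : List (List Int)) :
    (pvBlocks gs).reverse.flatten = pvPairsOf gs := by
  induction gs with
  | nil => rfl
  | cons g t ih => simp [pvBlocks, pvPairsOf, ih]

lemma pvRange_shift (a b c : Int) :
    PySem.List.pyRange (a + c) (b + c) 1 = (PySem.List.pyRange a b 1).map (· + c) := by
  rw [PySem.List.pyRange_one, PySem.List.pyRange_one]
  have h : b + c - (a + c) = b - a := by ring
  rw [h, List.map_map]
  apply List.map_congr_left
  intro k _
  simp
  ring

lemma pvInner (gs : List (List Int)) (idx : Int) (h : 0 ≤ idx) :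
    (PySem.List.pyRange 1 ((gs.length : Int) - idx) 1).flatMap
        (fun down => PySem.List.pyGetD gs (idx + down) [])
      = (gs.drop (idx.toNat + 1)).flatten := by
  have h1 : PySem.List.pyRange (idx + 1) (gs.length : Int) 1
      = (PySem.List.pyRange 1 ((gs.length : Int) - idx) 1).map (· + idx) := by
    have := pvRange_shift 1 ((gs.length : Int) - idx) idx
    rw [show (1 : Int) + idx = idx + 1 by ring, show (gs.length : Int) - idx + idx = (gs.length : Int) by ring] at this
    exact this
  have h2 : (PySem.List.pyRange (idx + 1) (gs.length : Int) 1).flatMap (fun j => PySem.List.pyGetD gs j [])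
      = (gs.drop (idx.toNat + 1)).flatten := by
    rw [List.flatMap_def, ← PySem.List.len_eq, PySem.List.map_pyGetD_pyRange gs [] (by omega),
      show (idx + 1).toNat = idx.toNat + 1 by omega]
  rw [h1, List.flatMap_def, List.map_map] at h2
  rw [List.flatMap_def, ← h2]
  congr 1
  apply List.map_congr_left
  intro j _
  simp [Int.add_comm]

-- the flatMap form of A's index loops, over the full index range
lemma pvOuterFull (gs : List (List Int)) :
    (PySem.List.pyRange 0 ((gs.length : Int)) 1).flatMap
        (fun idx => pvMk (PySem.List.pyGetD gs idx []) ((gs.drop (idx.toNat + 1)).flatten))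
      = pvPairsOf gs := by
  induction gs with
  | nil => simp [PySem.List.pyRange_one_eq_nil, pvPairsOf]
  | cons g t ih =>
    rw [PySem.List.pyRange_one_cons (by exact_mod_cast Nat.succ_pos t.length)]
    rw [List.flatMap_cons]
    have hshift : PySem.List.pyRange (0 + 1) (((g :: t).length : Int)) 1
        = (PySem.List.pyRange 0 ((t.length : Int)) 1).map (· + 1) := by
      have := pvRange_shift 0 ((t.length : Int)) 1
      simpa using this
    rw [hshift, List.flatMap_map]
    have hterms : ∀ j ∈ PySem.List.pyRange 0 ((t.length : Int)) 1,
        pvMk (PySem.List.pyGetD (g :: t) (j + 1) []) (((g :: t).drop ((j + 1).toNat + 1)).flatten)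
          = pvMk (PySem.List.pyGetD t j []) ((t.drop (j.toNat + 1)).flatten) := by
      intro j hj
      have hj0 : 0 ≤ j := ((PySem.List.mem_pyRange_one).1 hj).1
      have h1 : PySem.List.pyGetD (g :: t) (j + 1) [] = PySem.List.pyGetD t j [] := by
        have : j = ((j.toNat : Nat) : Int) := by omega
        rw [this, show ((j.toNat : Nat) : Int) + 1 = ((j.toNat + 1 : Nat) : Int) by push_cast; ring,
          PySem.List.pyGetD_natCast, PySem.List.pyGetD_natCast]
        rfl
      have h2 : (j + 1).toNat + 1 = (j.toNat + 1) + 1 := by omega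
      rw [h1, h2, List.drop_succ_cons]
    rw [List.flatMap_def, List.map_congr_left hterms, ← List.flatMap_def, ih]
    simp only [pvPairsOf, List.drop_succ_cons]
    congr 1
    have : PySem.List.pyGetD (g :: t) 0 [] = g := by
      rw [show (0:Int) = ((0:Nat):Int) from rfl, PySem.List.pyGetD_natCast]; rfl
    rw [this, show Int.toNat 0 = 0 from rfl, List.drop_zero]

-- A's whole pair loop equals pvPairsOf
lemma pvOuter (gs : List (List Int)) :
    (PySem.List.pyRange 0 ((gs.length : Int) - 1) 1).flatMap
        (fun idx => pvMk (PySem.List.pyGetD gs idx []) ((gs.drop (idx.toNat + 1)).flatten))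
      = pvPairsOf gs := by
  rcases gs with - | ⟨g, t⟩
  · simp [PySem.List.pyRange_one_eq_nil, pvPairsOf]
  · rw [← pvOuterFull (g :: t)]
    have hlen : ((g :: t).length : Int) = ((g :: t).length : Int) - 1 + 1 := by ring
    rw [hlen, PySem.List.pyRange_one_succ_right (by
      have : ((g :: t).length : Int) = (t.length : Int) + 1 := by simp
      omega),
      List.flatMap_append, List.flatMap_cons, List.flatMap_nil]
    have hdrop : ((g :: t).drop ((((g :: t).length : Int) - 1).toNat + 1)).flatten = [] := by
      have : (((g :: t).length : Int) - 1).toNat + 1 = (g :: t).length := by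
        simp only [List.length_cons]; omega
      rw [this, List.drop_length, List.flatten_nil]
    rw [hdrop]
    simp [pvMk]

-- A's whole pair loop equals pvPairsOf
lemma pvAloop (gs : List (List Int)) :
    (PySem.List.pyRange 0 ((gs.length : Int) - 1) 1).flatMap (fun idx =>
      (PySem.List.pyGetD gs idx []).flatMap (fun node_1 =>
        (PySem.List.pyRange 1 ((gs.length : Int) - idx) 1).flatMap (fun down_idx =>
          (PySem.List.pyGetD gs (idx + down_idx) []).map (fun node_2 => [node_1, node_2]))))
      = pvPairsOf gs := by
  rw [← pvOuter gs, List.flatMap_def, List.flatMap_def]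
  congr 1
  apply List.map_congr_left
  intro idx hidx
  have hidx0 : 0 ≤ idx := ((PySem.List.mem_pyRange_one).1 hidx).1
  simp only [pvMk, List.flatMap_def, List.flatMap_def]
  congr 1
  apply List.map_congr_left
  intro n1 _
  rw [← List.flatMap_def, ← List.map_flatMap, pvInner gs idx hidx0]

-- the '+= 0' boundary pass leaves every count unchanged
lemma pvA_getD (l : List Int) (d : PySem.Dict Int Int) (n : Int) :
    (l.foldl (fun d k => d.modify k 0 (· + 0)) d).getD n 0 = d.getD n 0 := by
  induction l generalizing d with
  | nil => rfl
  | cons k t ih =>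
    simp only [List.foldl_cons, ih]
    rw [PySem.Dict.getD_modify]
    split
    · simp [*]
    · rfl

-- and so does B's setdefault pass
lemma pvB_getD (l : List Int) (d : PySem.Dict Int Int) (n : Int) :
    (l.foldl (fun d k => d.setdefault k 0) d).getD n 0 = d.getD n 0 := by
  induction l generalizing d with
  | nil => rfl
  | cons k t ih =>
    simp only [List.foldl_cons, ih]
    by_cases hk : n = k
    · subst hk; exact PySem.Dict.getD_setdefault_self d n 0 0
    · rw [PySem.Dict.getD_eq_get?_getD, PySem.Dict.get?_setdefault_of_ne d 0 hk,
        ← PySem.Dict.getD_eq_get?_getD]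

-- both boundary passes register exactly the new keys, in order
lemma pvB_keys (l : List Int) (d : PySem.Dict Int Int) :
    (l.foldl (fun d k => d.setdefault k 0) d).keys = PySem.Set.update d.keys l := by
  induction l generalizing d with
  | nil => rfl
  | cons k t ih =>
    simp only [List.foldl_cons, ih, PySem.Set.update_cons]
    congr 1
    rw [PySem.Dict.keys_setdefault, PySem.Set.add_eq_ite]
    by_cases hk : k ∈ d.keys
    · simp [hk, (PySem.Dict.contains_iff_mem_keys d k).2 hk]
    · simp only [if_neg hk]
      have : d.contains k = false := by
        by_contra hc
        exact hk ((PySem.Dict.contains_iff_mem_keys d k).1 (by simpa using hc))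
      simp [this]

-- grouping fold: value at c collects, in order, the nodes whose key is c
lemma pvGroupGet (l : List Int) (key : Int → Int) (d : PySem.Dict Int (List Int)) (c : Int) :
    (l.foldl (fun d n => d.modify (key n) [] (· ++ [n])) d).getD c []
      = d.getD c [] ++ l.filter (fun n => key n == c) := by
  have h := PySem.Dict.getD_foldl_modify_append (l.map (fun n => (key n, n))) d c
  rw [List.foldl_map, List.filter_map, List.map_map] at h
  simpa [Function.comp_def] using h

-- on a duplicate-free list, the ascending sort is the reverse of the descending one
lemma pvSortAscRev (xs : List Int) (h : xs.Nodup) :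
    PySem.List.sorted xs (fun c => c) false = (PySem.List.sorted xs (fun c => c) true).reverse := by
  apply PySem.List.sorted_eq_of_perm_of_pairwise_lt
  · exact ((PySem.List.sorted xs (fun c => c) true).reverse_perm).trans
      (PySem.List.sorted_perm xs (fun c => c) true)
  · have hrev := PySem.List.sorted_pairwise_rev xs (fun c => c)
    have hnd : (PySem.List.sorted xs (fun c => c) true).Nodup :=
      ((PySem.List.sorted_perm xs (fun c => c) true).nodup_iff).2 h
    rw [List.pairwise_reverse]
    exact (hrev.and hnd).imp (fun hab => lt_of_le_of_ne hab.1 (Ne.symm hab.2))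

-- the two ports agree on every input
lemma pvMain (scs bds : List (List Int)) :
    pair_wise_process scs bds = pair_wise_process_alt scs bds := by
  simp only [pair_wise_process, pair_wise_process_alt]
  simp only [← List.foldl_flatten]
  rw [← PySem.Dict.counter_eq_foldl]
  set ncd := List.foldl (fun d out_node => d.modify out_node 0 fun x => x + 0)
      (PySem.Dict.counter scs.flatten) bds.flatten with hncd
  set counts := List.foldl (fun d node => d.setdefault node 0)
      (PySem.Dict.counter scs.flatten) bds.flatten with hcounts
  have hg : ∀ n : Int, ncd.getD n 0 = ((scs.flatten.count n : Nat) : Int) := by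
    intro n; rw [hncd, pvA_getD, PySem.Dict.getD_counter]
  have hgB : ∀ n : Int, counts.getD n 0 = ((scs.flatten.count n : Nat) : Int) := by
    intro n; rw [hcounts, pvB_getD, PySem.Dict.getD_counter]
  have hk : ncd.keys = PySem.Set.update (PySem.Set.ofList scs.flatten) bds.flatten := by
    rw [hncd, PySem.Dict.keys_foldl_modify bds.flatten 0 (fun _ _ v => v + 0),
      PySem.Dict.keys_counter]
  have hkB : counts.keys = ncd.keys := by
    rw [hcounts, pvB_keys, PySem.Dict.keys_counter, hk]
  simp only [hg, hgB, hkB]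
  set cnld := List.foldl (fun d node => d.modify ((List.count node scs.flatten : Nat) : Int) [] fun x => x ++ [node])
      PySem.Dict.empty ncd.keys with hcnld
  have hck : cnld.keys = PySem.Set.ofList (ncd.keys.map (fun n => ((List.count n scs.flatten : Nat) : Int))) := by
    rw [hcnld, PySem.Dict.keys_foldl_modify_key ncd.keys
      (fun n => ((List.count n scs.flatten : Nat) : Int)) [] (fun _ n v => v ++ [n]),
      PySem.Dict.keys_empty, PySem.Set.update_nil_left]
  have hcgt : ∀ c : Int, cnld.getD c []
      = ncd.keys.filter (fun n => ((List.count n scs.flatten : Nat) : Int) == c) := by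
    intro c
    rw [hcnld, pvGroupGet, PySem.Dict.getD_empty, List.nil_append]
  simp only [PySem.List.foldl_append_singleton_eq_map,
    PySem.List.foldl_append_eq_flatMap, List.nil_append]
  simp only [hck, hcgt]
  rw [pvSortAscRev _ (PySem.Set.nodup_ofList _), pvAloop,
    PySem.List.foldl_append_eq_flatten, List.nil_append, List.foldl_reverse,
    pvBfold _ (fun c => ncd.keys.filter (fun n => ((List.count n scs.flatten : Nat) : Int) == c))]
  exact (pvBlocksFlatten _).symm

-- ===== VERDICT (by name: the statement is the Claim_ definition above) =====
theorem pair_wise_process_spec : Claim_equal_pair_wise_process := by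
  intro scs bds _
  unfold Spec_pair_wise_process
  exact pvMain scs bds
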